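-- pv_equiv track=rewrite | github.com/johanchristhofer/CursoPython | Ejercicios/Ejercicios_2.2.1_listas.py | PositNegatOrd
-- ===== SOURCE A (Python) =====
-- def PositNegatOrd(lst):
--     """
--     >>> PositNegatOrd([69, -37, 0,  -27, -59, 83, 1, 45])
--     ([0, 1, 45, 69, 83], [-59, -37, -27])
--     """
--     pos, neg = [], []
--     for n in lst:
--         if n >= 0:
--             pos.append(n)
--         else:
--             neg.append(n)
--     pos.sort()
--     neg.sort()
--     return pos, neg
-- ===== SOURCE B (Python) =====
-- def PositNegatOrd(lst):
--     s = sorted(lst)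
--     i = 0
--     while i < len(s) and s[i] < 0:
--         i += 1
--     return s[i:], s[:i]
-- ===== Notes on version B (the rewrite author's own statement) =====
-- stated objective: simpler
-- what changed: B sorts the whole list once and splits the sorted list at the first non-negative element (negative prefix / non-negative suffix), instead of partitioning first and sorting each half separately.
import Mathlib
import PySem

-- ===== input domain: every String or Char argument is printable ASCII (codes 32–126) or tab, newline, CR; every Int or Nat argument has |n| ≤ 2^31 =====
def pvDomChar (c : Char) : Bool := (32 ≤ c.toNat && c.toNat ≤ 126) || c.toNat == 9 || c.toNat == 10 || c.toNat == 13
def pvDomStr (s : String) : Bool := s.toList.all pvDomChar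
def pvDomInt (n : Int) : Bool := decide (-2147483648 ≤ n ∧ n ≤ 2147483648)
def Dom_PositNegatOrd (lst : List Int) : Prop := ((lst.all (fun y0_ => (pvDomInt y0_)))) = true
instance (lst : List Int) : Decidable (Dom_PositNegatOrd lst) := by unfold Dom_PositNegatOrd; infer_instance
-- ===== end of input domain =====

-- B sorts the list once and splits it at the first non-negative element, instead of
-- partitioning first and sorting each half separately (objective: simpler).

-- ===== PORT A =====
-- the for-loop appending to pos/neg, then pos.sort(), neg.sort()
def PositNegatOrd (lst : List Int) : List Int × List Int :=
  let pn := lst.foldl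
    (fun pn n => if n ≥ 0 then (pn.1 ++ [n], pn.2) else (pn.1, pn.2 ++ [n]))
    ([], [])
  (PySem.List.sorted pn.1 (fun x => x) false, PySem.List.sorted pn.2 (fun x => x) false)

-- ===== PORT B =====
-- the 'while i < len(s) and s[i] < 0: i += 1' loop of Source B
def negPrefixLen : List Int → Nat
  | [] => 0
  | x :: t => if x < 0 then negPrefixLen t + 1 else 0

def PositNegatOrd_alt (lst : List Int) : List Int × List Int :=
  let s := PySem.List.sorted lst (fun x => x) false
  let i := negPrefixLen s
  (PySem.List.slice s (some (i : Int)) none, PySem.List.slice s none (some (i : Int)))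

-- ===== PRECONDITION & SPEC =====
def Spec_PositNegatOrd (lst : List Int) (out : List Int × List Int) : Prop := out = PositNegatOrd_alt lst
instance (lst : List Int) (out : List Int × List Int) : Decidable (Spec_PositNegatOrd lst out) := by unfold Spec_PositNegatOrd; infer_instance

-- ===== CLAIM (what is proved, stated in full; the proofs are below) =====
def Claim_equal_PositNegatOrd : Prop := ∀ (lst : List Int), Dom_PositNegatOrd lst → Spec_PositNegatOrd lst (PositNegatOrd lst)

-- ===== LEMMAS AND PROOFS =====

-- A's partition loop is the two filters
theorem loopA (lst p q : List Int) :
    lst.foldl (fun pn n => if n ≥ 0 then (pn.1 ++ [n], pn.2) else (pn.1, pn.2 ++ [n])) (p, q)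
      = (p ++ lst.filter (fun n => decide (0 ≤ n)), q ++ lst.filter (fun n => decide (n < 0))) := by
  induction lst generalizing p q with
  | nil => simp
  | cons x t ih =>
    by_cases hx : 0 ≤ x
    · simp [List.foldl_cons, hx, ih, List.append_assoc]
    · simp [List.foldl_cons, hx, not_le.mp hx, ih, List.append_assoc]

-- splitting a weakly increasing list at its negative prefix gives the two filters
theorem split_sorted (s : List Int) (h : s.Pairwise (· ≤ ·)) :
    s.drop (negPrefixLen s) = s.filter (fun n => decide (0 ≤ n)) ∧
    s.take (negPrefixLen s) = s.filter (fun n => decide (n < 0)) := by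
  induction s with
  | nil => simp [negPrefixLen]
  | cons x t ih =>
    rcases List.pairwise_cons.mp h with ⟨hx, ht⟩
    rcases ih ht with ⟨ihd, iht⟩
    by_cases hneg : x < 0
    · simp [negPrefixLen, hneg, not_le.mpr hneg, ihd, iht]
    · rw [not_lt] at hneg
      have hall : ∀ y ∈ t, 0 ≤ y := fun y hy => le_trans hneg (hx y hy)
      constructor
      · simp only [negPrefixLen, if_neg (not_lt.mpr hneg), List.drop_zero]
        rw [List.filter_cons_of_pos (by simpa using hneg),
            List.filter_eq_self.mpr (fun y hy => by simpa using hall y hy)]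
      · simp only [negPrefixLen, if_neg (not_lt.mpr hneg), List.take_zero]
        rw [eq_comm, List.filter_eq_nil_iff]
        intro y hy
        rcases List.mem_cons.mp hy with rfl | hy'
        · simpa using hneg
        · simpa using hall y hy'

-- sorting a filtered list = filtering the sorted list
theorem sorted_filter (lst : List Int) (p : Int → Bool) :
    PySem.List.sorted (lst.filter p) (fun x => x) false
      = (PySem.List.sorted lst (fun x => x) false).filter p := by
  apply PySem.List.sorted_id_eq_of_perm_of_pairwise
  · exact (PySem.List.sorted_perm lst (fun x => x) false).filter p
  · exact (PySem.List.sorted_pairwise lst (fun x => x)).filter p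

-- ===== VERDICT (by name: the statement is the Claim_ definition above) =====
theorem PositNegatOrd_spec : Claim_equal_PositNegatOrd := by
  intro lst _
  show PositNegatOrd lst = PositNegatOrd_alt lst
  unfold PositNegatOrd PositNegatOrd_alt
  rw [loopA]
  simp only [List.nil_append]
  have hp := PySem.List.sorted_pairwise lst (fun x => x)
  rcases split_sorted (PySem.List.sorted lst (fun x => x) false) hp with ⟨hd, ht⟩
  rw [PySem.List.slice_from_natCast, PySem.List.slice_to_natCast, hd, ht,
      sorted_filter, sorted_filter]
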